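-- pv_equiv track=rewrite | github.com/elenaisnanocat/AlgoAutoPush | 프로그래머스/lv0/120837. 개미 군단/개미 군단.py | solution
-- ===== SOURCE A (Python) =====
-- def solution(hp):
--     answer = 0
--     while hp > 0:
--         if hp >= 5:
--             fiv = hp // 5
--             hp -= 5 * fiv
--             answer += fiv
--         elif hp >= 3:
--             th = hp // 3
--             hp -= 3 * th
--             answer += th
--         elif hp >= 1:
--             one = hp // 1
--             hp -= 1 * one
--             answer += one
--     return answer
-- ===== SOURCE B (Python) =====
-- def solution(hp):
--     if hp <= 0:
--         return 0
--     return hp // 5 + (hp % 5) // 3 + (hp % 5) % 3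
-- ===== Notes on version B (the rewrite author's own statement) =====
-- stated objective: simpler
-- what changed: Replaced the while-loop greedy decomposition with the closed-form hp//5 + (hp%5)//3 + (hp%5)%3 (0 for non-positive hp), eliminating the loop entirely.
import Mathlib
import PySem

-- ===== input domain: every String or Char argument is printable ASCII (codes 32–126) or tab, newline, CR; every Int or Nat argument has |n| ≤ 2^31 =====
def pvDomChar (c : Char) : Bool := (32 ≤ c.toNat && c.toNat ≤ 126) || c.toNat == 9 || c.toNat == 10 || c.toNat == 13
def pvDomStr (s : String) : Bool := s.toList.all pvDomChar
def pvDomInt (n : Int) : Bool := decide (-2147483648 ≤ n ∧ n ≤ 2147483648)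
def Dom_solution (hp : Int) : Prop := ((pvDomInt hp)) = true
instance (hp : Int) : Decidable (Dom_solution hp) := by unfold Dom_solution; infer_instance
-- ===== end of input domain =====

-- B replaces A's greedy while-loop by the closed form hp//5 + (hp%5)//3 + (hp%5)%3 (0 for hp ≤ 0): simpler, no loop.

-- ===== PORT A =====
-- while hp > 0: peel off 5s, else 3s, else 1s, accumulating the count in answer
def solutionLoop (hp answer : Int) : Int :=
  if _h : hp > 0 then
    if hp ≥ 5 then
      solutionLoop (hp - 5 * PySem.Int.floordiv hp 5) (answer + PySem.Int.floordiv hp 5)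
    else if hp ≥ 3 then
      solutionLoop (hp - 3 * PySem.Int.floordiv hp 3) (answer + PySem.Int.floordiv hp 3)
    else
      solutionLoop (hp - 1 * PySem.Int.floordiv hp 1) (answer + PySem.Int.floordiv hp 1)
  else answer
termination_by hp.toNat
decreasing_by
  · have h5 := PySem.Int.mod_nonneg hp (b := 5) (by omega)
    have h5' := PySem.Int.mod_lt hp (b := 5) (by omega)
    have := PySem.Int.floordiv_mul_add_mod hp 5
    omega
  · have h3 := PySem.Int.mod_nonneg hp (b := 3) (by omega)
    have h3' := PySem.Int.mod_lt hp (b := 3) (by omega)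
    have := PySem.Int.floordiv_mul_add_mod hp 3
    omega
  · have h1 := PySem.Int.mod_nonneg hp (b := 1) (by omega)
    have h1' := PySem.Int.mod_lt hp (b := 1) (by omega)
    have := PySem.Int.floordiv_mul_add_mod hp 1
    omega

def solution (hp : Int) : Int := solutionLoop hp 0

-- ===== PORT B =====
def solution_alt (hp : Int) : Int :=
  if hp ≤ 0 then 0
  else PySem.Int.floordiv hp 5 + PySem.Int.floordiv (PySem.Int.mod hp 5) 3
       + PySem.Int.mod (PySem.Int.mod hp 5) 3

-- ===== PRECONDITION & SPEC =====
def Spec_solution (hp : Int) (out : Int) : Prop := out = solution_alt hp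
instance (hp : Int) (out : Int) : Decidable (Spec_solution hp out) := by unfold Spec_solution; infer_instance

-- ===== CLAIM (what is proved, stated in full; the proofs are below) =====
def Claim_equal_solution : Prop := ∀ (hp : Int), Dom_solution hp → Spec_solution hp (solution hp)

-- ===== LEMMAS AND PROOFS =====
-- For 0 ≤ hp < 5 the loop returns answer + hp//3 + hp%3.
theorem solutionLoop_small (hp answer : Int) (h0 : 0 ≤ hp) (h5 : hp < 5) :
    solutionLoop hp answer = answer + PySem.Int.floordiv hp 3 + PySem.Int.mod hp 3 := by
  interval_cases hp <;> simp [solutionLoop, PySem.Int.floordiv, PySem.Int.mod]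

theorem solutionLoop_eq (hp answer : Int) :
    solutionLoop hp answer = answer + solution_alt hp := by
  by_cases hpos : hp > 0
  · by_cases h5 : hp ≥ 5
    · rw [solutionLoop]
      have hmod := PySem.Int.floordiv_mul_add_mod hp 5
      have hm0 := PySem.Int.mod_nonneg hp (b := 5) (by omega)
      have hm5 := PySem.Int.mod_lt hp (b := 5) (by omega)
      simp only [hpos, h5, if_pos, dif_pos]
      have hrem : hp - 5 * PySem.Int.floordiv hp 5 = PySem.Int.mod hp 5 := by omega
      rw [hrem, solutionLoop_small _ _ hm0 hm5]
      simp only [solution_alt, if_neg (by omega : ¬ hp ≤ 0)]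
      ring
    · rw [solutionLoop_small hp answer (by omega) (by omega)]
      have hm0 := PySem.Int.mod_nonneg hp (b := 5) (by omega)
      have hmod := PySem.Int.floordiv_mul_add_mod hp 5
      have hdv : PySem.Int.floordiv hp 5 = 0 := by
        have hm5 := PySem.Int.mod_lt hp (b := 5) (by omega)
        nlinarith [PySem.Int.floordiv_mul_add_mod hp 5]
      have : PySem.Int.mod hp 5 = hp := by omega
      simp only [solution_alt, if_neg (by omega : ¬ hp ≤ 0), this, hdv]
      ring
  · rw [solutionLoop]
    simp [hpos, solution_alt, show hp ≤ 0 by omega]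

-- ===== VERDICT (by name: the statement is the Claim_ definition above) =====
theorem solution_spec : Claim_equal_solution := by
  intro hp _
  unfold Spec_solution solution
  rw [solutionLoop_eq]
  ring
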